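-- pv_equiv track=rewrite | github.com/ttnhan18062000/XAI-Sentence-Embedding | utils.py | group_multiwords
-- ===== SOURCE A (Python) =====
-- def group_multiwords(lst, multiwords):
--     result = []
--     i = 0
--     while i < len(lst):
--         found_multiword = False
--         for mw in multiwords:
--             mw_lst = mw.split()
--             if lst[i:i+len(mw_lst)] == mw_lst:
--                 result.append(mw)
--                 i += len(mw_lst)
--                 found_multiword = True
--                 break
--         if not found_multiword:
--             result.append(lst[i])
--             i += 1
--     return result
-- ===== SOURCE B (Python) =====
-- def group_multiwords(lst, multiwords):
--     # Index multiwords by their first token so each position only tests matching candidates.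
--     index = {}
--     for mw in multiwords:
--         parts = mw.split()
--         if parts:
--             index.setdefault(parts[0], []).append((mw, parts))
--     result = []
--     i = 0
--     n = len(lst)
--     while i < n:
--         for mw, parts in index.get(lst[i], ()):
--             if lst[i:i + len(parts)] == parts:
--                 result.append(mw)
--                 i += len(parts)
--                 break
--         else:
--             result.append(lst[i])
--             i += 1
--     return result
-- ===== Notes on version B (the rewrite author's own statement) =====
-- stated objective: faster
-- what changed: B precomputes each multiword's token split once and builds a dict indexing the (multiword, split) candidates by first token, so each list position only tests the few candidates whose first token matches instead of re-splitting and testing every multiword.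
-- outside the precondition, e.g. on group_multiwords(['a'], ['a', '']): A returns ['a'], B returns ['a']; on group_multiwords([], ['']): A returns [], B returns []
import Mathlib
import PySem

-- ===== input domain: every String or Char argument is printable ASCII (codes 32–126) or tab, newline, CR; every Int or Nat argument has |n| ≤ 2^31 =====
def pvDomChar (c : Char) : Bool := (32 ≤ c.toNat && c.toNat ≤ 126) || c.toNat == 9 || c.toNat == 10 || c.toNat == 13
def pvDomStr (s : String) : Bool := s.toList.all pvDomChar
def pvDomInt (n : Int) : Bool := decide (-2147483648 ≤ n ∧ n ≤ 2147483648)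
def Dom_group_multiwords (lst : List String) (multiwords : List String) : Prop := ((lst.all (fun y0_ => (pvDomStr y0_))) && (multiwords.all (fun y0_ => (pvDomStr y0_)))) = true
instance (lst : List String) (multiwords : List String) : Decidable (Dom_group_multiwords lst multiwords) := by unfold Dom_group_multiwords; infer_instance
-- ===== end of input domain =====

-- B indexes the (multiword, split) candidates by first token so each position tests only matching candidates; measured faster.


-- ===== PORT A =====
-- the inner 'for mw in multiwords: … break': first multiword whose split matches the front of rest, with its split length
def pvFindMW (rest : List String) : List String → Option (String × Nat)
  | [] => none
  | mw :: mws =>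
      let mw_lst := PySem.Str.split₀ mw
      if rest.take mw_lst.length = mw_lst then some (mw, mw_lst.length)
      else pvFindMW rest mws

-- the 'while i < len(lst)' loop on the remaining suffix lst[i:]; fuel = lst.length bounds the iteration count
-- (inside Pre_ every step consumes ≥ 1 token; where a step would consume 0 tokens Python loops forever — outside Pre_)
def pvLoopA (multiwords : List String) : Nat → List String → List String
  | 0, _ => []
  | _ + 1, [] => []
  | fuel + 1, x :: xs =>
      match pvFindMW (x :: xs) multiwords with
      | some (mw, k) => mw :: pvLoopA multiwords fuel ((x :: xs).drop k)
      | none => x :: pvLoopA multiwords fuel xs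

def group_multiwords (lst : List String) (multiwords : List String) : List String :=
  pvLoopA multiwords lst.length lst

-- ===== PORT B =====
-- index.setdefault(parts[0], []).append((mw, parts)) for each mw with nonempty split
def pvBuildIdx (multiwords : List String) : PySem.Dict String (List (String × List String)) :=
  multiwords.foldl
    (fun d mw =>
      let parts := PySem.Str.split₀ mw
      match parts with
      | [] => d
      | h :: _ => d.insert h (d.getD h [] ++ [(mw, parts)]))
    PySem.Dict.empty

-- the inner 'for mw, parts in index.get(lst[i], ()): … break'
def pvFindCand (rest : List String) : List (String × List String) → Option (String × Nat)
  | [] => none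
  | (mw, parts) :: cs =>
      if rest.take parts.length = parts then some (mw, parts.length)
      else pvFindCand rest cs

def pvLoopB (idx : PySem.Dict String (List (String × List String))) : Nat → List String → List String
  | 0, _ => []
  | _ + 1, [] => []
  | fuel + 1, x :: xs =>
      match pvFindCand (x :: xs) (idx.getD x []) with
      | some (mw, k) => mw :: pvLoopB idx fuel ((x :: xs).drop k)
      | none => x :: pvLoopB idx fuel xs

def group_multiwords_alt (lst : List String) (multiwords : List String) : List String :=
  pvLoopB (pvBuildIdx multiwords) lst.length lst

-- ===== PRECONDITION & SPEC =====
-- Pre_ excludes multiword lists containing a whitespace-only string: such a multiword splits to [] and matches the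
-- empty slice without advancing i, so A loops forever whenever the inner loop reaches it; on the excluded inputs where
-- A still returns (a nonempty match always fires first, or lst is empty) B returns the same value anyway.
def Pre_group_multiwords (lst : List String) (multiwords : List String) : Prop :=
  ∀ mw ∈ multiwords, PySem.Str.split₀ mw ≠ []
instance (lst : List String) (multiwords : List String) : Decidable (Pre_group_multiwords lst multiwords) := by unfold Pre_group_multiwords; infer_instance

def pvWitness_group_multiwords : List String × List String :=
  (["new", "york", "is", "big"], ["new york", "big apple"])

def Spec_group_multiwords (lst : List String) (multiwords : List String) (out : List String) : Prop := out = group_multiwords_alt lst multiwords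
instance (lst : List String) (multiwords : List String) (out : List String) : Decidable (Spec_group_multiwords lst multiwords out) := by unfold Spec_group_multiwords; infer_instance

-- ===== CLAIM (what is proved, stated in full; the proofs are below) =====
def Claim_equal_group_multiwords : Prop := ∀ (lst : List String) (multiwords : List String), Dom_group_multiwords lst multiwords → Pre_group_multiwords lst multiwords → Spec_group_multiwords lst multiwords (group_multiwords lst multiwords)

-- ===== LEMMAS AND PROOFS =====

-- the candidates stored under key x: the multiwords whose split is nonempty and starts with x, in order
def pvCands (multiwords : List String) (x : String) : List (String × List String) :=
  multiwords.filterMap (fun mw =>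
    let parts := PySem.Str.split₀ mw
    match parts with
    | [] => none
    | h :: _ => if h = x then some (mw, parts) else none)

theorem pvBuildIdx_aux (mws : List String) (x : String) :
    ∀ d : PySem.Dict String (List (String × List String)),
      (mws.foldl
        (fun d mw =>
          let parts := PySem.Str.split₀ mw
          match parts with
          | [] => d
          | h :: _ => d.insert h (d.getD h [] ++ [(mw, parts)])) d).getD x []
      = d.getD x [] ++ pvCands mws x := by
  induction mws with
  | nil => intro d; simp [pvCands]
  | cons mw mws ih =>
    intro d
    cases hp : PySem.Str.split₀ mw with
    | nil => simp [List.foldl, hp, ih, pvCands, List.filterMap]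
    | cons h t =>
      simp only [List.foldl, hp, ih, pvCands, List.filterMap]
      rw [PySem.Dict.getD_insert]
      by_cases hx : h = x
      · subst hx; simp [List.append_assoc]
      · simp [hx, Ne.symm hx]

theorem pvBuildIdx_getD (multiwords : List String) (x : String) :
    (pvBuildIdx multiwords).getD x [] = pvCands multiwords x := by
  unfold pvBuildIdx
  rw [pvBuildIdx_aux]
  simp

theorem pvFind_eq (x : String) (xs : List String) (multiwords : List String)
    (hpre : ∀ mw ∈ multiwords, PySem.Str.split₀ mw ≠ []) :
    pvFindMW (x :: xs) multiwords = pvFindCand (x :: xs) (pvCands multiwords x) := by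
  induction multiwords with
  | nil => simp [pvFindMW, pvCands, pvFindCand]
  | cons mw mws ih =>
    have hmw := hpre mw (by simp)
    have hrest : ∀ m ∈ mws, PySem.Str.split₀ m ≠ [] :=
      fun m hm => hpre m (by simp [hm])
    cases hp : PySem.Str.split₀ mw with
    | nil => exact absurd hp hmw
    | cons h t =>
      by_cases hx : h = x
      · subst hx
        have hcands : pvCands (mw :: mws) h = (mw, h :: t) :: pvCands mws h := by
          simp [pvCands, hp]
        rw [hcands]
        simp only [pvFindMW, pvFindCand, hp]
        split_ifs with hc
        · rfl
        · exact ih hrest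
      · have hcands : pvCands (mw :: mws) x = pvCands mws x := by
          simp [pvCands, hp, hx]
        have hne : (x :: xs).take (h :: t).length ≠ h :: t := by
          simp only [List.length_cons, List.take_succ_cons]
          intro hcontra
          exact hx (by injection hcontra with h1 _; exact h1.symm)
        rw [hcands]
        simp only [pvFindMW, hp, if_neg hne]
        exact ih hrest

theorem pvLoop_eq (multiwords : List String)
    (hpre : ∀ mw ∈ multiwords, PySem.Str.split₀ mw ≠ []) (fuel : Nat) (rest : List String) :
    pvLoopA multiwords fuel rest = pvLoopB (pvBuildIdx multiwords) fuel rest := by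
  induction fuel generalizing rest with
  | zero => rfl
  | succ fuel ih =>
    cases rest with
    | nil => rfl
    | cons x xs =>
      simp only [pvLoopA, pvLoopB, pvBuildIdx_getD, ← pvFind_eq x xs multiwords hpre]
      cases pvFindMW (x :: xs) multiwords with
      | none => simp [ih]
      | some p => simp [ih]

-- ===== VERDICT (by name: the statement is the Claim_ definition above) =====
theorem group_multiwords_spec : Claim_equal_group_multiwords := by
  intro lst multiwords _ hpre
  unfold Spec_group_multiwords group_multiwords group_multiwords_alt
  exact pvLoop_eq multiwords hpre lst.length lst
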